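-- pv_equiv track=rewrite | github.com/seoul0809/algorithm-study-2nd | heeheej/week28/PRG_121683_외톨이_알파벳.py | solution
-- ===== SOURCE A (Python) =====
-- def solution(input_string):
--     answer = ''
--     once = []   # 한번 이상 나타난 알파벳
--     arr = []    # 외톨이 알파벳
--     last_char = "-"
--     for x in input_string:
--         if x not in once:   # 처음 나온 알파벳이면
--             once.append(x)
--         elif last_char != x and x not in arr:
--             # 두번 이상 나온 알파벳인데,
--             # 앞 덩어리와 분리되어있고
--             # 외톨이 알파벳 리스트에도 안들어있는 경우 외톨이 알파벳에 추가
--             arr.append(x)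
--         last_char = x
--     if arr:
--         arr.sort()  # 알파벳순으로 정렬
--         answer = ''.join(arr)
--     else:
--         answer = "N"
--     return answer
-- ===== SOURCE B (Python) =====
-- def solution(input_string):
--     # run-compress the string to the heads of maximal runs
--     heads = []
--     for c in input_string:
--         if not heads or heads[-1] != c:
--             heads.append(c)
--     # count runs per letter
--     counts = {}
--     for c in heads:
--         counts[c] = counts.get(c, 0) + 1
--     lonely = sorted(c for c in counts if counts[c] >= 2)
--     return ''.join(lonely) if lonely else 'N'
-- ===== Notes on version B (the rewrite author's own statement) =====
-- stated objective: alternative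
-- what changed: Replaces A's once/arr/last_char state machine with run-compression of the string followed by a run-count pass: a letter is lonely iff it heads at least two maximal runs.
import Mathlib
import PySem

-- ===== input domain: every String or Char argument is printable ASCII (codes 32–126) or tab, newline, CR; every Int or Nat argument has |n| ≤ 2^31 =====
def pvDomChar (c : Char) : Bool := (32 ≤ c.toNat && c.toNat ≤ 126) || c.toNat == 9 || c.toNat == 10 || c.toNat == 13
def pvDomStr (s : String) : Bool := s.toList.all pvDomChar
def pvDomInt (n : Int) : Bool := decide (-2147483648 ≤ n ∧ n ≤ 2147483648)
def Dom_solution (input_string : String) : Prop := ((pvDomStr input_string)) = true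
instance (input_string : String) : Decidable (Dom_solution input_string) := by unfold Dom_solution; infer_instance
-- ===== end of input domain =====

-- B replaces A's once/arr/last_char state machine by run-compression plus run counting (objective: alternative decomposition).

-- ===== PORT A =====
-- state: (once, arr, last_char), exactly A's loop body
def solStepA (st : List Char × List Char × Char) (x : Char) : List Char × List Char × Char :=
  match st with
  | (once, arr, last) =>
    if x ∉ once then (once ++ [x], arr, x)
    else if last ≠ x ∧ x ∉ arr then (once, arr ++ [x], x)
    else (once, arr, x)

def solution (input_string : String) : String :=
  let st := input_string.toList.foldl solStepA ([], [], '-')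
  if st.2.1 ≠ [] then String.mk (PySem.List.sorted st.2.1 (fun c => c) false) else "N"

-- ===== PORT B =====
-- heads loop: append c when heads is empty or its last element differs
def solStepB (hs : List Char) (c : Char) : List Char :=
  if hs = [] ∨ hs.getLast? ≠ some c then hs ++ [c] else hs

def solution_alt (input_string : String) : String :=
  let heads := input_string.toList.foldl solStepB []
  let counts := heads.foldl (fun d c => d.insert c (d.getD c 0 + 1)) (PySem.Dict.empty : PySem.Dict Char Int)
  let lonely := PySem.List.sorted (counts.keys.filter (fun c => 2 ≤ counts.getD c 0)) (fun c => c) false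
  if lonely ≠ [] then String.mk lonely else "N"

-- ===== PRECONDITION & SPEC =====
def Spec_solution (input_string : String) (out : String) : Prop := out = solution_alt input_string
instance (input_string : String) (out : String) : Decidable (Spec_solution input_string out) := by unfold Spec_solution; infer_instance

-- ===== CLAIM (what is proved, stated in full; the proofs are below) =====
def Claim_equal_solution : Prop := ∀ (input_string : String), Dom_solution input_string → Spec_solution input_string (solution input_string)

-- ===== LEMMAS AND PROOFS =====

-- invariant relating A's state to B's run-heads list
def solRel (st : List Char × List Char × Char) (hs : List Char) : Prop :=
  (∀ c, c ∈ st.1 ↔ c ∈ hs) ∧ (∀ c, c ∈ st.2.1 ↔ 2 ≤ hs.count c) ∧ st.2.1.Nodup ∧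
  (hs ≠ [] → hs.getLast? = some st.2.2)

theorem solCount_append_singleton (hs : List Char) (x c : Char) :
    (hs ++ [x]).count c = hs.count c + (if c = x then 1 else 0) := by
  by_cases h : c = x
  · simp [List.count_append, h]
  · simp [List.count_append, h, Ne.symm h]

theorem solNodup_append_singleton (arr : List Char) (x : Char) (h3 : arr.Nodup) (hxa : x ∉ arr) :
    (arr ++ [x]).Nodup := by
  simp [List.nodup_append, h3]
  exact fun a ha he => hxa (he ▸ ha)

theorem solFinal (arr L : List Char)
    (h : PySem.List.sorted arr (fun c => c) false = PySem.List.sorted L (fun c => c) false) :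
    (if arr ≠ [] then String.mk (PySem.List.sorted arr (fun c => c) false) else "N") =
    (if PySem.List.sorted L (fun c => c) false ≠ [] then String.mk (PySem.List.sorted L (fun c => c) false) else "N") := by
  by_cases ha : arr = []
  · have hsl : PySem.List.sorted L (fun c => c) false = [] := by
      rw [← h, ha]
      exact (PySem.List.sorted_eq_nil_iff _ _ _).2 rfl
    simp [ha, hsl]
  · have h1 : PySem.List.sorted arr (fun c => c) false ≠ [] := by
      simp [PySem.List.sorted_eq_nil_iff _ _ _, ha]
    have h2 : PySem.List.sorted L (fun c => c) false ≠ [] := h ▸ h1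
    simp [ha, h2, h]

theorem solRel_step (st : List Char × List Char × Char) (hs : List Char) (x : Char)
    (h : solRel st hs) : solRel (solStepA st x) (solStepB hs x) := by
  obtain ⟨once, arr, last⟩ := st
  obtain ⟨h1, h2, h3, h4⟩ := h
  dsimp only at h1 h2 h3 h4
  by_cases hemp : hs = [] ∨ hs.getLast? ≠ some x
  · -- B appends x: a new run starts
    have hB : solStepB hs x = hs ++ [x] := by simp [solStepB, hemp]
    by_cases hx : x ∈ once
    · -- x seen before: its run count is ≥ 1, and last ≠ x
      have hxh : x ∈ hs := (h1 x).1 hx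
      have hne : hs ≠ [] := by intro h; simp [h] at hxh
      have hlast : hs.getLast? = some last := h4 hne
      have hlx : last ≠ x := by
        rcases hemp with h | h
        · exact absurd h hne
        · intro he; exact h (he ▸ hlast)
      have hcnt : 1 ≤ hs.count x := List.count_pos_iff.2 hxh
      have hmem : ∀ c, c ∈ once ↔ c ∈ hs ++ [x] := by
        intro c
        rw [h1, List.mem_append]
        exact ⟨Or.inl, fun h => h.elim id (fun hc => by simp at hc; exact hc ▸ hxh)⟩
      by_cases hxa : x ∈ arr
      · have hA : solStepA (once, arr, last) x = (once, arr, x) := by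
          simp [solStepA, hx, hxa]
        rw [hA, hB]
        refine ⟨hmem, ?_, h3, fun _ => by simp⟩
        intro c
        dsimp only
        rw [solCount_append_singleton]
        by_cases hc : c = x
        · rw [hc]
          have := (h2 x).1 hxa
          have h1eq : (if x = x then 1 else 0) = 1 := if_pos rfl
          rw [h1eq]
          exact ⟨fun _ => by omega, fun _ => hxa⟩
        · rw [if_neg hc, h2]
          omega
      · have hA : solStepA (once, arr, last) x = (once, arr ++ [x], x) := by
          simp [solStepA, hx, hxa, hlx]
        rw [hA, hB]
        refine ⟨hmem, ?_, solNodup_append_singleton arr x h3 hxa, fun _ => by simp⟩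
        intro c
        dsimp only
        rw [solCount_append_singleton, List.mem_append]
        by_cases hc : c = x
        · rw [hc]
          have h1eq : (if x = x then 1 else 0) = 1 := if_pos rfl
          rw [h1eq]
          exact ⟨fun _ => by omega, fun _ => Or.inr (by simp)⟩
        · rw [if_neg hc, h2]
          simp [hc]
    · -- x is new: its run count was 0
      have hxh : x ∉ hs := fun h => hx ((h1 x).2 h)
      have hcnt : hs.count x = 0 := List.count_eq_zero.2 hxh
      have hxa : x ∉ arr := fun h => by have := (h2 x).1 h; omega
      have hA : solStepA (once, arr, last) x = (once ++ [x], arr, x) := by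
        simp [solStepA, hx]
      rw [hA, hB]
      refine ⟨?_, ?_, h3, fun _ => by simp⟩
      · intro c; dsimp only; simp [List.mem_append, h1]
      · intro c
        dsimp only
        rw [solCount_append_singleton, h2]
        by_cases hc : c = x
        · rw [hc, hcnt]
          have h1eq : (if x = x then 1 else 0) = 1 := if_pos rfl
          rw [h1eq]
          omega
        · rw [if_neg hc]
          omega
  · -- same run continues: B keeps hs, A's elif guard last ≠ x fails
    rw [not_or, not_not] at hemp
    obtain ⟨hne, hlast⟩ := hemp
    have hl : last = x := by
      have h4' := h4 hne
      rw [h4'] at hlast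
      exact Option.some_inj.1 hlast
    have hxh : x ∈ hs := List.mem_of_getLast? hlast
    have hx : x ∈ once := (h1 x).2 hxh
    have hB : solStepB hs x = hs := by simp [solStepB, hne, hlast]
    have hA : solStepA (once, arr, last) x = (once, arr, x) := by
      simp [solStepA, hx, hl]
    rw [hA, hB]
    exact ⟨h1, h2, h3, fun _ => hlast⟩

theorem solRel_foldl (l : List Char) (st : List Char × List Char × Char) (hs : List Char)
    (h : solRel st hs) : solRel (l.foldl solStepA st) (l.foldl solStepB hs) := by
  induction l generalizing st hs with
  | nil => exact h
  | cons x t ih => exact ih _ _ (solRel_step st hs x h)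

theorem solution_spec : Claim_equal_solution := by
  intro s _
  unfold Spec_solution solution solution_alt
  have hrel : solRel (s.toList.foldl solStepA ([], [], '-')) (s.toList.foldl solStepB []) := by
    apply solRel_foldl
    exact ⟨by simp, by simp, List.nodup_nil, by simp⟩
  set st := s.toList.foldl solStepA ([], [], '-') with hst
  set hs := s.toList.foldl solStepB [] with hhs
  obtain ⟨h1, h2, h3, h4⟩ := hrel
  -- B's dict facts
  have hcount : ∀ c, (hs.foldl (fun d c => d.insert c (d.getD c 0 + 1)) (PySem.Dict.empty : PySem.Dict Char Int)).getD c 0 = hs.count c := by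
    intro c
    rw [PySem.Dict.getD_foldl_insert_add_one]
    simp [PySem.Dict.getD_empty]
  have hkeys : (hs.foldl (fun d c => d.insert c (d.getD c 0 + 1)) (PySem.Dict.empty : PySem.Dict Char Int)).keys = PySem.Set.update (PySem.Dict.empty : PySem.Dict Char Int).keys hs := by
    exact PySem.Dict.keys_foldl_insert hs _ _
  set counts := hs.foldl (fun d c => d.insert c (d.getD c 0 + 1)) (PySem.Dict.empty : PySem.Dict Char Int) with hcnts
  set L := counts.keys.filter (fun c => 2 ≤ counts.getD c 0) with hL
  have hmemk : ∀ c, c ∈ counts.keys ↔ c ∈ hs := by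
    intro c
    rw [hkeys]
    simp [PySem.Dict.keys_empty, PySem.Set.mem_update]
  have hndk : counts.keys.Nodup := by
    rw [hcnts]
    exact PySem.Dict.nodup_keys_foldl_insert _ _ _ (by simp [PySem.Dict.keys_empty])
  have hmemL : ∀ c, c ∈ L ↔ 2 ≤ hs.count c := by
    intro c
    rw [hL]
    simp only [List.mem_filter, decide_eq_true_eq, hcount, hmemk]
    constructor
    · rintro ⟨_, h⟩; exact_mod_cast h
    · intro h
      refine ⟨List.count_pos_iff.1 (by omega), by exact_mod_cast h⟩
  have hndL : L.Nodup := List.Nodup.filter _ hndk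
  -- arr and L are permutations of each other
  have hperm : st.2.1.Perm L := by
    rw [List.perm_ext_iff_of_nodup h3 hndL]
    intro c; rw [h2, hmemL]
  have hsorted : PySem.List.sorted st.2.1 (fun c => c) false = PySem.List.sorted L (fun c => c) false :=
    PySem.List.sorted_eq_sorted_of_perm _ _ _ (fun a b h => h) hperm
  exact solFinal st.2.1 L hsorted
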